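-- pv_equiv track=rewrite | github.com/nolanderc/advent-of-code | 2023/day18.py | inclusion_exclusion
-- ===== SOURCE A (Python) =====
-- def inclusion_exclusion(instructions):
--     y = 0
--     area = 0
--     total_steps = 0
--     for dir, steps in instructions:
--         total_steps += steps
--         if dir == 'R': area += steps * y
--         if dir == 'L': area -= steps * y
--         if dir == 'U': y += steps
--         if dir == 'D': y -= steps
--     return abs(area) + total_steps // 2 + 1
-- ===== SOURCE B (Python) =====
-- def inclusion_exclusion(instructions):
--     # Walk the instructions building an explicit vertex table, then sum
--     # trapezoid areas over consecutive vertex pairs (shoelace, trapezoid form).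
--     x, y = 0, 0
--     verts = [(0, 0)]
--     total_steps = 0
--     for dir, steps in instructions:
--         total_steps += steps
--         if dir == 'R':
--             x += steps
--         elif dir == 'L':
--             x -= steps
--         elif dir == 'U':
--             y += steps
--         elif dir == 'D':
--             y -= steps
--         verts.append((x, y))
--     twice_area = 0
--     for (x0, y0), (x1, y1) in zip(verts, verts[1:]):
--         twice_area += (x1 - x0) * (y0 + y1)
--     return abs(twice_area) // 2 + total_steps // 2 + 1
-- ===== Notes on version B (the rewrite author's own statement) =====
-- stated objective: alternative
-- what changed: B replaces A's single-pass y-only incremental area accumulation by a two-phase decomposition: first build an explicit (x,y) vertex table while summing steps, then a second shoelace (trapezoid-form) pass over consecutive vertex pairs whose doubled sum is halved exactly.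
import Mathlib
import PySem

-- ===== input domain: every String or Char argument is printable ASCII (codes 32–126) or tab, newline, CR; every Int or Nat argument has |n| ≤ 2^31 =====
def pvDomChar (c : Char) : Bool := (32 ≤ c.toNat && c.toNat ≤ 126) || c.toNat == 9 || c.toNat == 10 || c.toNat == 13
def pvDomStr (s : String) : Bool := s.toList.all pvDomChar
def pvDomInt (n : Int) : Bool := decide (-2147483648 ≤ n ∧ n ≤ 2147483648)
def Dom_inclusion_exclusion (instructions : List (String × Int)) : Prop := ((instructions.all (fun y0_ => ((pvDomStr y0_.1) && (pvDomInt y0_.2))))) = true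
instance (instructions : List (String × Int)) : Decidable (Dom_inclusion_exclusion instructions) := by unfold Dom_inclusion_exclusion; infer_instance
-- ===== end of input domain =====

-- B replaces A's y-only incremental accumulation by an explicit vertex table plus a second
-- shoelace (trapezoid-form) pass over consecutive vertex pairs; objective: alternative decomposition.

-- ===== PORT A =====
-- the loop body of A ('total_steps += steps', four independent ifs)
def pvStepA (st : Int × Int × Int) (p : String × Int) : Int × Int × Int :=
  let y := st.1
  let area := st.2.1
  let total := st.2.2 + p.2
  let area := if p.1 == "R" then area + p.2 * y else area
  let area := if p.1 == "L" then area - p.2 * y else area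
  let y := if p.1 == "U" then y + p.2 else y
  let y := if p.1 == "D" then y - p.2 else y
  (y, area, total)

def inclusion_exclusion (instructions : List (String × Int)) : Int :=
  let s := instructions.foldl pvStepA (0, 0, 0)
  |s.2.1| + PySem.Int.floordiv s.2.2 2 + 1

-- ===== PORT B =====
-- the if/elif chain of B's first loop: the position after one instruction
def pvMove (x y : Int) (p : String × Int) : Int × Int :=
  if p.1 == "R" then (x + p.2, y)
  else if p.1 == "L" then (x - p.2, y)
  else if p.1 == "U" then (x, y + p.2)
  else if p.1 == "D" then (x, y - p.2)
  else (x, y)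

-- B's first loop body: advance position, add steps, append the new vertex
def pvStepB (st : Int × Int × Int × List (Int × Int)) (p : String × Int) :
    Int × Int × Int × List (Int × Int) :=
  let xy := pvMove st.1 st.2.1 p
  (xy.1, xy.2, st.2.2.1 + p.2, st.2.2.2 ++ [xy])

def inclusion_exclusion_alt (instructions : List (String × Int)) : Int :=
  let s := instructions.foldl pvStepB (0, 0, 0, [((0 : Int), (0 : Int))])
  let verts := s.2.2.2
  let twice := (verts.zip verts.tail).foldl
    (fun acc q => acc + (q.2.1 - q.1.1) * (q.1.2 + q.2.2)) 0
  PySem.Int.floordiv |twice| 2 + PySem.Int.floordiv s.2.2.1 2 + 1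

-- ===== PRECONDITION & SPEC =====
def Spec_inclusion_exclusion (instructions : List (String × Int)) (out : Int) : Prop := out = inclusion_exclusion_alt instructions
instance (instructions : List (String × Int)) (out : Int) : Decidable (Spec_inclusion_exclusion instructions out) := by unfold Spec_inclusion_exclusion; infer_instance

-- ===== CLAIM (what is proved, stated in full; the proofs are below) =====
def Claim_equal_inclusion_exclusion : Prop := ∀ (instructions : List (String × Int)), Dom_inclusion_exclusion instructions → Spec_inclusion_exclusion instructions (inclusion_exclusion instructions)

-- ===== LEMMAS AND PROOFS =====

-- recursive form of B's second loop
def pairSum : List (Int × Int) → Int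
  | a :: b :: rest => (b.1 - a.1) * (a.2 + b.2) + pairSum (b :: rest)
  | _ => 0

lemma zip_foldl_pairSum : ∀ (l : List (Int × Int)) (acc : Int),
    (l.zip l.tail).foldl (fun acc q => acc + (q.2.1 - q.1.1) * (q.1.2 + q.2.2)) acc
      = acc + pairSum l
  | [], acc => by simp [pairSum]
  | [a], acc => by simp [pairSum]
  | a :: b :: rest, acc => by
      have ih := zip_foldl_pairSum (b :: rest) (acc + (b.1 - a.1) * (a.2 + b.2))
      simp only [List.zip, List.tail, List.zipWith, List.foldl] at ih ⊢
      rw [ih, pairSum]; ring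

lemma pairSum_snoc : ∀ (vs : List (Int × Int)) (u v : Int × Int),
    pairSum ((vs ++ [u]) ++ [v]) = pairSum (vs ++ [u]) + (v.1 - u.1) * (u.2 + v.2)
  | [], u, v => by simp [pairSum]
  | [a], u, v => by simp [pairSum]; try ring
  | a :: b :: t, u, v => by
      have ih := pairSum_snoc (b :: t) u v
      simp only [List.cons_append, pairSum] at ih ⊢
      rw [ih]; ring

-- per-step: the y-coordinates stay in lockstep and the trapezoid contribution of the
-- new edge is exactly twice A's area increment
lemma step_edge (vs : List (Int × Int)) (x y area total : Int) (p : String × Int) :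
    (pvMove x y p).2 = (pvStepA (y, area, total) p).1 ∧
    pairSum ((vs ++ [(x, y)]) ++ [pvMove x y p])
      = pairSum (vs ++ [(x, y)]) + 2 * ((pvStepA (y, area, total) p).2.1 - area) := by
  rw [pairSum_snoc]
  by_cases h1 : p.1 = "R" <;> by_cases h2 : p.1 = "L" <;>
    by_cases h3 : p.1 = "U" <;> by_cases h4 : p.1 = "D" <;>
    simp_all [pvMove, pvStepA] <;> try ring

-- the fold invariant: B's running total equals A's, and the trapezoid sum over B's
-- vertex table grows by exactly twice A's area increment
lemma fold_inv : ∀ (l : List (String × Int)) (x y area total : Int) (vs : List (Int × Int)),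
    (l.foldl pvStepB (x, y, total, vs ++ [(x, y)])).2.2.1
        = (l.foldl pvStepA (y, area, total)).2.2
    ∧ pairSum (l.foldl pvStepB (x, y, total, vs ++ [(x, y)])).2.2.2
        = pairSum (vs ++ [(x, y)]) + 2 * ((l.foldl pvStepA (y, area, total)).2.1 - area)
  | [], x, y, area, total, vs => by simp
  | p :: l, x, y, area, total, vs => by
      obtain ⟨hy, harea⟩ := step_edge vs x y area total p
      have hv : pvMove x y p = ((pvMove x y p).1, (pvStepA (y, area, total) p).1) := by
        rw [← hy]
      have hB : pvStepB (x, y, total, vs ++ [(x, y)]) p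
          = ((pvMove x y p).1, (pvStepA (y, area, total) p).1, total + p.2,
             (vs ++ [(x, y)]) ++ [pvMove x y p]) := by
        simp [pvStepB, hy]
      have hA : pvStepA (y, area, total) p
          = ((pvStepA (y, area, total) p).1, (pvStepA (y, area, total) p).2.1,
             total + p.2) := by
        simp [pvStepA]
      have ih := fold_inv l (pvMove x y p).1 (pvStepA (y, area, total) p).1
        (pvStepA (y, area, total) p).2.1 (total + p.2) (vs ++ [(x, y)])
      rw [← hv] at ih
      constructor
      · rw [List.foldl_cons, List.foldl_cons, hB, hA]
        exact ih.1
      · rw [List.foldl_cons, List.foldl_cons, hB, hA]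
        rw [ih.2, harea]; ring

-- ===== VERDICT (by name: the statement is the Claim_ definition above) =====
theorem inclusion_exclusion_spec : Claim_equal_inclusion_exclusion := by
  intro instructions _
  unfold Spec_inclusion_exclusion
  simp only [inclusion_exclusion, inclusion_exclusion_alt]
  obtain ⟨ht, hp⟩ := fold_inv instructions 0 0 0 0 []
  simp only [List.nil_append] at ht hp
  have hps : pairSum [((0 : Int), (0 : Int))] = 0 := by simp [pairSum]
  rw [zip_foldl_pairSum, hp, hps, ht]
  have habs : |(0 : Int) + (0 + 2 * ((instructions.foldl pvStepA (0, 0, 0)).2.1 - 0))|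
      = 2 * |(instructions.foldl pvStepA (0, 0, 0)).2.1| := by
    rw [zero_add, zero_add, sub_zero, abs_mul]; norm_num
  rw [habs, PySem.Int.floordiv_eq_ediv_of_pos (by norm_num : (0 : Int) < 2), PySem.Int.floordiv_eq_ediv_of_pos (by norm_num : (0 : Int) < 2)]
  rw [Int.mul_ediv_cancel_left _ (by norm_num : (2 : Int) ≠ 0)]
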